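-- pv_equiv track=rewrite | github.com/Joey9797/algorithm-study | 250219/5099-1-bake-pizza.py | melt_cheese
-- ===== SOURCE A (Python) =====
-- def melt_cheese(ov, N): # 오븐에 들어간 피자 치즈 녹이기
--     is_melted = False
--     for i in range(N):
--         ov[i] //= 2
--     for p in ov:
--         if p == 0:
--             is_melted = True
--             break
--     if is_melted:
--         return ov
--     else:
--         return melt_cheese(ov, N)
-- ===== SOURCE B (Python) =====
-- def melt_cheese(ov, N):
--     # One closed-form pass: the loop count is forced by the data, so compute it
--     # directly instead of simulating pass after pass.
--     if 0 in ov[N:]: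
--         t = 1
--     else:
--         t = min(max(1, v.bit_length()) for v in ov[:N] if v >= 0)
--     d = 2 ** t
--     for i in range(N):
--         ov[i] //= d
--     return ov
-- ===== Notes on version B (the rewrite author's own statement) =====
-- stated objective: faster
-- what changed: A repeatedly sweeps the first N cells halving them and rescans for a zero until one appears; B computes the forced number of passes t in closed form (1 if a zero sits at index >= N, else the minimum of max(1, bit_length(v)) over the nonnegative cells among the first N) and divides each of the first N cells by 2**t in a single pass.
import Mathlib
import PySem

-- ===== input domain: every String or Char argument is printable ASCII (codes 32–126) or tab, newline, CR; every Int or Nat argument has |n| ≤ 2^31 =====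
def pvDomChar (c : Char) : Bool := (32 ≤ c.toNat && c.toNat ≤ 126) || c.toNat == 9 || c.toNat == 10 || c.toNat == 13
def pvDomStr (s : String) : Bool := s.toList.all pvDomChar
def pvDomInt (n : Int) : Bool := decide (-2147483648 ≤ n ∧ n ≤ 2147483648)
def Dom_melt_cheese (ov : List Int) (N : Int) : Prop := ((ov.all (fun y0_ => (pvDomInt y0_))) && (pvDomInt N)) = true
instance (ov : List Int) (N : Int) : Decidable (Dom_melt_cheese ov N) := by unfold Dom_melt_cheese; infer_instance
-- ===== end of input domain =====

-- B replaces A's repeated halving passes by computing the forced pass count t in closed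
-- form (bit_length) and dividing each of the first N cells by 2^t once (objective: faster).
-- Both A and B mutate `ov` in place identically in Python; the theorems are about the return value.


-- ===== PORT A =====
-- `for i in range(N): ov[i] //= 2`  (pyGetD/pySetD are exact under Pre_, which puts every i of the range in bounds)
def meltPassA (ov : List Int) (N : Int) : List Int :=
  (PySem.List.pyRange 0 N 1).foldl
    (fun acc i => PySem.List.pySetD acc i (PySem.Int.floordiv (PySem.List.pyGetD acc i 0) 2)) ov

-- A's tail recursion, with a fuel guard only to make it total: on Dom ∧ Pre_ (values
-- bounded by 2^31, so bit lengths ≤ 32) the recursion returns within 33 calls, and the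
-- proof shows the fuel is never exhausted there.
def meltA : Nat → List Int → Int → List Int
  | 0, ov, _ => ov
  | fuel+1, ov, N =>
    let ov' := meltPassA ov N
    if ov'.any (· == 0) then ov' else meltA fuel ov' N

def melt_cheese (ov : List Int) (N : Int) : List Int := meltA 64 ov N

-- ===== PORT B =====
def melt_cheese_alt (ov : List Int) (N : Int) : List Int :=
  let t : Nat :=
    if (PySem.List.slice ov (some N) none).contains 0 then 1
    else
      -- min(max(1, v.bit_length()) for v in ov[:N] if v >= 0); the generator is nonempty
      -- under Pre_, so min? is some and the .getD 1 default is never used there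
      (PySem.List.min?
        (((PySem.List.slice ov none (some N)).filter (fun v => 0 ≤ v)).map
          (fun v => max 1 (PySem.Int.bitLength v)))
        (fun x => x)).getD 1
  let d : Int := 2 ^ t
  (PySem.List.pyRange 0 N 1).foldl
    (fun acc i => PySem.List.pySetD acc i (PySem.Int.floordiv (PySem.List.pyGetD acc i 0) d)) ov

-- ===== PRECONDITION & SPEC =====
-- Pre_ excludes: N > len(ov) (A raises IndexError), and inputs where no cell can ever
-- reach 0 — no 0 at index >= max(N,0) and only negative cells before N — on which A
-- recurses forever (Python dies with RecursionError); B raises ValueError there.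
def Pre_melt_cheese (ov : List Int) (N : Int) : Prop :=
  N ≤ ov.length ∧
    ((0 : Int) ∈ ov.drop N.toNat ∨ ∃ v ∈ ov.take N.toNat, 0 ≤ v)
instance (ov : List Int) (N : Int) : Decidable (Pre_melt_cheese ov N) := by
  unfold Pre_melt_cheese; infer_instance

def pvWitness_melt_cheese : List Int × Int := ([5, -3, 7], 2)

def Spec_melt_cheese (ov : List Int) (N : Int) (out : List Int) : Prop := out = melt_cheese_alt ov N
instance (ov : List Int) (N : Int) (out : List Int) : Decidable (Spec_melt_cheese ov N out) := by unfold Spec_melt_cheese; infer_instance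

-- ===== CLAIM (what is proved, stated in full; the proofs are below) =====
def Claim_equal_melt_cheese : Prop := ∀ (ov : List Int) (N : Int), Dom_melt_cheese ov N → Pre_melt_cheese ov N → Spec_melt_cheese ov N (melt_cheese ov N)

-- ===== LEMMAS AND PROOFS =====

-- state of the oven after t halving passes over the first n cells
def shifted (ov : List Int) (n : Nat) (t : Nat) : List Int :=
  (ov.take n).map (fun v => PySem.Int.floordiv v (2 ^ t)) ++ ov.drop n

theorem length_shifted (ov : List Int) (n t : Nat) (h : n ≤ ov.length) :
    (shifted ov n t).length = ov.length := by
  simp [shifted]; omega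

-- the common shape of both passes: one sweep divides the first n cells by d
theorem pass_eq (ov : List Int) (n : Nat) (d : Int) (h : n ≤ ov.length) :
    (PySem.List.pyRange 0 (n : Int) 1).foldl
      (fun acc i => PySem.List.pySetD acc i (PySem.Int.floordiv (PySem.List.pyGetD acc i 0) d)) ov
    = (ov.take n).map (fun v => PySem.Int.floordiv v d) ++ ov.drop n := by
  induction n with
  | zero => simp [PySem.List.pyRange_one_eq_nil]
  | succ m ih =>
    have hm : m ≤ ov.length := by omega
    have hsplit : PySem.List.pyRange 0 ((m : Int) + 1) 1
        = PySem.List.pyRange 0 (m : Int) 1 ++ [(m : Int)] := by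
      exact PySem.List.pyRange_one_succ_right (by omega)
    have hcast : ((m + 1 : Nat) : Int) = (m : Int) + 1 := by push_cast; ring
    rw [hcast, hsplit, List.foldl_append, ih hm]
    simp only [List.foldl_cons, List.foldl_nil]
    set L := (ov.take m).map (fun v => PySem.Int.floordiv v d) with hL
    have hlenL : L.length = m := by simp [hL]; omega
    have hget : PySem.List.pyGetD (L ++ ov.drop m) (m : Int) 0 = ov[m] := by
      rw [PySem.List.pyGetD_natCast]
      rw [List.getD_eq_getElem?_getD]
      rw [List.getElem?_append_right (by omega)]
      rw [hlenL, Nat.sub_self]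
      have : (ov.drop m)[0]? = some ov[m] := by
        rw [List.getElem?_drop]; simp
      simp [this]
    rw [PySem.List.pySetD_natCast, hget]
    rw [List.set_append_right _ _ (by omega)]
    rw [hlenL, Nat.sub_self]
    have hdrop : ov.drop m = ov[m] :: ov.drop (m + 1) := List.drop_eq_getElem_cons h
    have htake : ov.take (m + 1) = ov.take m ++ [ov[m]] := by
      rw [List.take_succ]; simp [List.getElem?_eq_getElem h]
    rw [hdrop, List.set_cons_zero, htake, List.map_append, List.append_assoc]
    rfl

theorem floordiv_pow_succ (v : Int) (t : Nat) :
    PySem.Int.floordiv (PySem.Int.floordiv v (2 ^ t)) 2 = PySem.Int.floordiv v (2 ^ (t + 1)) := by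
  rw [PySem.Int.floordiv_eq_ediv_of_pos (by positivity),
      PySem.Int.floordiv_eq_ediv_of_pos (by norm_num),
      PySem.Int.floordiv_eq_ediv_of_pos (by positivity)]
  rw [Int.ediv_ediv_of_nonneg (by positivity)]
  rw [pow_succ]

-- one pass of A advances `shifted ov n t` to `shifted ov n (t+1)`
theorem passA_shifted (ov : List Int) (n t : Nat) (h : n ≤ ov.length) :
    meltPassA (shifted ov n t) (n : Int) = shifted ov n (t + 1) := by
  have hlen : n ≤ (shifted ov n t).length := by rw [length_shifted _ _ _ h]; exact h
  unfold meltPassA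
  rw [pass_eq _ _ _ hlen]
  have hA : ((ov.take n).map (fun v => PySem.Int.floordiv v (2 ^ t))).length = n := by
    simp; omega
  have htake : (shifted ov n t).take n = (ov.take n).map (fun v => PySem.Int.floordiv v (2 ^ t)) := by
    rw [shifted, List.take_append_of_le_length (by omega), List.take_of_length_le (by omega)]
  have hdrop : (shifted ov n t).drop n = ov.drop n := by
    have h1 : ((((ov.take n).map (fun v => PySem.Int.floordiv v (2 ^ t))) ++ ov.drop n).drop
        ((ov.take n).map (fun v => PySem.Int.floordiv v (2 ^ t))).length) = ov.drop n :=
      List.drop_left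
    rw [hA] at h1
    exact h1
  rw [htake, hdrop, List.map_map]
  unfold shifted
  congr 1
  apply List.map_congr_left
  intro v _
  exact floordiv_pow_succ v t

theorem floordiv_pow_eq_zero_iff (v : Int) (t : Nat) :
    PySem.Int.floordiv v (2 ^ t) = 0 ↔ 0 ≤ v ∧ v < 2 ^ t := by
  rw [PySem.Int.floordiv_eq_iff_of_pos (by positivity)]
  constructor <;> intro h <;> constructor <;> omega

theorem lt_pow_iff_bitLength_le (v : Int) (hv : 0 ≤ v) (t : Nat) :
    v < 2 ^ t ↔ PySem.Int.bitLength v ≤ t := by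
  constructor
  · intro h
    by_contra hc
    push_neg at hc
    rcases eq_or_ne v 0 with rfl | hne
    · simp [PySem.Int.bitLength_zero] at hc
    · have h1 := PySem.Int.two_pow_bitLength_le v hne
      have h2 : (2 : Nat) ^ t ≤ 2 ^ (PySem.Int.bitLength v - 1) :=
        Nat.pow_le_pow_right (by norm_num) (by omega)
      have h3 : v.natAbs = v.toNat := by omega
      have h4 : (v.toNat : Int) = v := Int.toNat_of_nonneg hv
      have : (2 : Int) ^ t ≤ v := by
        calc (2 : Int) ^ t = ((2 ^ t : Nat) : Int) := by push_cast; ring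
        _ ≤ ((2 ^ (PySem.Int.bitLength v - 1) : Nat) : Int) := by exact_mod_cast h2
        _ ≤ ((v.natAbs : Nat) : Int) := by exact_mod_cast h1
        _ = v := by rw [h3, h4]
      omega
  · intro h
    have h1 := PySem.Int.lt_two_pow_bitLength v
    have h2 : (2 : Nat) ^ PySem.Int.bitLength v ≤ 2 ^ t := Nat.pow_le_pow_right (by norm_num) h
    have h3 : v.natAbs = v.toNat := by omega
    have h4 : (v.toNat : Int) = v := Int.toNat_of_nonneg hv
    have : v < ((2 ^ t : Nat) : Int) := by
      calc v = ((v.toNat : Nat) : Int) := by rw [h4]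
      _ < ((2 ^ t : Nat) : Int) := by exact_mod_cast (by omega : v.toNat < 2 ^ t)
    calc v < ((2 ^ t : Nat) : Int) := this
    _ = 2 ^ t := by push_cast; ring

-- B's pass count, written out
def tB (ov : List Int) (n : Nat) : Nat :=
  if (0 : Int) ∈ ov.drop n then 1
  else
    (PySem.List.min?
      (((ov.take n).filter (fun v => 0 ≤ v)).map (fun v => max 1 (PySem.Int.bitLength v)))
      (fun x => x)).getD 1

theorem one_le_tB (ov : List Int) (n : Nat) : 1 ≤ tB ov n := by
  unfold tB
  split_ifs with h
  · omega
  · set L := ((ov.take n).filter (fun v => 0 ≤ v)).map (fun v => max 1 (PySem.Int.bitLength v)) with hL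
    cases hmin : PySem.List.min? L (fun x => x) with
    | none => simp
    | some m =>
      have hmem := PySem.List.min?_mem hmin
      simp only [hL, List.mem_map] at hmem
      obtain ⟨v, _, hv⟩ := hmem
      simp [hmin, ← hv]

-- the zero test on `shifted ov n t` holds exactly when t has reached tB
theorem anyZero_shifted_iff (ov : List Int) (n t : Nat) (hn : n ≤ ov.length) (ht : 1 ≤ t)
    (hpre : (0 : Int) ∈ ov.drop n ∨ ∃ v ∈ ov.take n, 0 ≤ v) :
    ((shifted ov n t).any (· == 0) = true) ↔ tB ov n ≤ t := by
  have hbool : (shifted ov n t).any (· == 0)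
      = ((ov.take n).any (fun v => PySem.Int.floordiv v (2 ^ t) == 0) || (ov.drop n).any (· == 0)) := by
    rw [shifted, List.any_append, List.any_map]; rfl
  have hany : ((shifted ov n t).any (· == 0) = true)
      ↔ ((∃ v ∈ ov.take n, PySem.Int.floordiv v (2 ^ t) = 0) ∨ (0 : Int) ∈ ov.drop n) := by
    rw [hbool, Bool.or_eq_true, List.any_eq_true, List.any_eq_true]
    simp only [beq_iff_eq]
    constructor
    · rintro (⟨v, hv, h0⟩ | ⟨v, hv, h0⟩)
      · exact Or.inl ⟨v, hv, h0⟩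
      · exact Or.inr (h0 ▸ hv)
    · rintro (⟨v, hv, h0⟩ | hv)
      · exact Or.inl ⟨v, hv, h0⟩
      · exact Or.inr ⟨0, hv, rfl⟩
  rw [hany]
  unfold tB
  split_ifs with hd
  · constructor
    · intro _; omega
    · intro _; exact Or.inr hd
  · set L := ((ov.take n).filter (fun v => 0 ≤ v)).map (fun v => max 1 (PySem.Int.bitLength v)) with hL
    have hLne : L ≠ [] := by
      rcases hpre with h | ⟨v, hv, hv0⟩
      · exact absurd h hd
      · simp only [hL]
        intro hnil
        rw [List.map_eq_nil_iff, List.filter_eq_nil_iff] at hnil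
        exact hnil v hv (by simpa using hv0)
    cases hmin : PySem.List.min? L (fun x => x) with
    | none => exact absurd ((PySem.List.min?_eq_none_iff _ _).mp hmin) hLne
    | some m =>
      have hmem := PySem.List.min?_mem hmin
      have hisMin := PySem.List.min?_isMin hmin
      simp only [hmin, Option.getD_some]
      constructor
      · rintro (⟨v, hv, h0⟩ | h)
        · rw [floordiv_pow_eq_zero_iff] at h0
          obtain ⟨hv0, hvlt⟩ := h0
          have hbl : PySem.Int.bitLength v ≤ t := (lt_pow_iff_bitLength_le v hv0 t).mp hvlt
          have hvL : max 1 (PySem.Int.bitLength v) ∈ L := by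
            simp only [hL, List.mem_map]
            exact ⟨v, List.mem_filter.mpr ⟨hv, by simpa using hv0⟩, rfl⟩
          have := hisMin _ hvL
          simp only at this
          omega
        · exact absurd h hd
      · intro hmt
        left
        simp only [hL, List.mem_map] at hmem
        obtain ⟨v, hvf, hveq⟩ := hmem
        have hvmem := List.mem_filter.mp hvf
        have hv0 : (0 : Int) ≤ v := by simpa using hvmem.2
        refine ⟨v, hvmem.1, ?_⟩
        rw [floordiv_pow_eq_zero_iff]
        refine ⟨hv0, ?_⟩
        rw [lt_pow_iff_bitLength_le v hv0 t]
        omega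

theorem shifted_zero (ov : List Int) (n : Nat) :
    shifted ov n 0 = ov := by
  unfold shifted
  have h : (fun v : Int => PySem.Int.floordiv v (2 ^ 0)) = fun v => v := by
    funext v
    rw [pow_zero, PySem.Int.floordiv_eq_ediv_of_pos (by norm_num), Int.ediv_one]
  rw [h, List.map_id', List.take_append_drop]

-- A's fueled recursion, started s passes in, lands on `shifted ov n (tB ov n)`
theorem meltA_shifted (ov : List Int) (n : Nat) (hn : n ≤ ov.length)
    (hpre : (0 : Int) ∈ ov.drop n ∨ ∃ v ∈ ov.take n, 0 ≤ v) :
    ∀ (fuel s : Nat), s < tB ov n → tB ov n ≤ s + fuel →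
      meltA fuel (shifted ov n s) (n : Int) = shifted ov n (tB ov n) := by
  intro fuel
  induction fuel with
  | zero => intro s h1 h2; omega
  | succ f ih =>
    intro s h1 h2
    rw [meltA]
    rw [passA_shifted ov n s hn]
    rw [show ((shifted ov n (s+1)).any (· == 0)) = decide (tB ov n ≤ s + 1) from ?_]
    · by_cases hle : tB ov n ≤ s + 1
      · have : tB ov n = s + 1 := by omega
        simp [hle, this]
      · simp only [hle, decide_false, Bool.false_eq_true, if_false]
        exact ih (s + 1) (by omega) (by omega)
    · by_cases hle : tB ov n ≤ s + 1
      · simp [hle, (anyZero_shifted_iff ov n (s+1) hn (by omega) hpre).mpr hle]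
      · simp only [hle, decide_false]
        rw [← Bool.not_eq_true]
        intro hc
        exact hle ((anyZero_shifted_iff ov n (s+1) hn (by omega) hpre).mp hc)

-- tB is at most 32 on Dom (every cell bounded by 2^31 in absolute value)
theorem tB_le_32 (ov : List Int) (n : Nat)
    (hdom : ∀ v ∈ ov, -2147483648 ≤ v ∧ v ≤ 2147483648)
    (hpre : (0 : Int) ∈ ov.drop n ∨ ∃ v ∈ ov.take n, 0 ≤ v) :
    tB ov n ≤ 32 := by
  unfold tB
  split_ifs with hd
  · omega
  · set L := ((ov.take n).filter (fun v => 0 ≤ v)).map (fun v => max 1 (PySem.Int.bitLength v)) with hL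
    cases hmin : PySem.List.min? L (fun x => x) with
    | none => simp
    | some m =>
      have hLne : L ≠ [] := fun hnil => by
        rcases hpre with h | ⟨v, hv, hv0⟩
        · exact hd h
        · rw [hL, List.map_eq_nil_iff, List.filter_eq_nil_iff] at hnil
          exact hnil v hv (by simpa using hv0)
      have hmem := PySem.List.min?_mem hmin
      simp only [hL, List.mem_map] at hmem
      obtain ⟨v, hvf, hveq⟩ := hmem
      have hvmem := List.mem_filter.mp hvf
      have hv0 : (0 : Int) ≤ v := by simpa using hvmem.2
      have hvov : v ∈ ov := List.mem_of_mem_take hvmem.1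
      have hvb := hdom v hvov
      have hbl : PySem.Int.bitLength v ≤ 32 := by
        by_contra hc
        push_neg at hc
        have h1 := PySem.Int.two_pow_bitLength_le v (by
          intro h0; rw [h0] at hc; simp [PySem.Int.bitLength_zero] at hc)
        have h2 : (2 : Nat) ^ 32 ≤ 2 ^ (PySem.Int.bitLength v - 1) :=
          Nat.pow_le_pow_right (by norm_num) (by omega)
        have : (2 : Nat) ^ 32 ≤ v.natAbs := le_trans h2 h1
        have : (4294967296 : Nat) ≤ v.natAbs := by norm_num at this ⊢; exact this
        omega
      simp only [Option.getD_some, ← hveq]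
      omega

-- B computes exactly `shifted ov n (tB ov n)`
theorem alt_eq_shifted (ov : List Int) (N : Int) (h0 : 0 ≤ N) (hlen : N ≤ ov.length)
    (hpre : (0 : Int) ∈ ov.drop N.toNat ∨ ∃ v ∈ ov.take N.toNat, 0 ≤ v) :
    melt_cheese_alt ov N = shifted ov N.toNat (tB ov N.toNat) := by
  unfold melt_cheese_alt
  have hN : N = ((N.toNat : Nat) : Int) := by omega
  have hslice_from : PySem.List.slice ov (some N) none = ov.drop N.toNat :=
    PySem.List.slice_from ov h0
  have hslice_to : PySem.List.slice ov none (some N) = ov.take N.toNat :=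
    PySem.List.slice_to ov h0
  have hteq : (if (PySem.List.slice ov (some N) none).contains 0 then 1
      else (PySem.List.min?
        (((PySem.List.slice ov none (some N)).filter (fun v => 0 ≤ v)).map
          (fun v => max 1 (PySem.Int.bitLength v))) (fun x => x)).getD 1) = tB ov N.toNat := by
    rw [hslice_from, hslice_to]
    unfold tB
    by_cases hd : (0 : Int) ∈ ov.drop N.toNat
    · simp [hd, List.contains_iff_mem]
    · simp only [if_neg hd]
      rw [if_neg (by simpa [List.contains_iff_mem] using hd)]
  simp only [hteq]
  have hp := pass_eq ov N.toNat (2 ^ tB ov N.toNat) (by omega)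
  rw [← hN] at hp
  rw [hp]
  rfl

-- ===== VERDICT (by name: the statement is the Claim_ definition above) =====
-- for N < 0 both programs leave ov untouched and return it (the halving loop is empty)
theorem both_id_of_neg (ov : List Int) (N : Int) (hneg : N < 0) (hz : (0 : Int) ∈ ov) :
    melt_cheese ov N = ov ∧ melt_cheese_alt ov N = ov := by
  have hrange : PySem.List.pyRange 0 N 1 = [] := PySem.List.pyRange_one_eq_nil (by omega)
  have hpass : meltPassA ov N = ov := by unfold meltPassA; rw [hrange]; rfl
  have hanyz : (ov.any (· == 0)) = true := by
    rw [List.any_eq_true]; exact ⟨0, hz, rfl⟩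
  constructor
  · unfold melt_cheese
    rw [meltA, hpass, hanyz]
    rfl
  · simp only [melt_cheese_alt]
    rw [hrange]
    rfl

theorem melt_cheese_spec : Claim_equal_melt_cheese := by
  intro ov N hdom hpre
  obtain ⟨hlen, hz⟩ := hpre
  unfold Spec_melt_cheese
  by_cases h0 : 0 ≤ N
  case neg =>
    have hneg : N < 0 := by omega
    have hz0 : (0 : Int) ∈ ov := by
      rcases hz with h | ⟨v, hv, _⟩
      · have : N.toNat = 0 := by omega
        rw [this, List.drop_zero] at h; exact h
      · have : N.toNat = 0 := by omega
        rw [this, List.take_zero] at hv; simp at hv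
    obtain ⟨hA, hB⟩ := both_id_of_neg ov N hneg hz0
    rw [hA, hB]
  case pos =>
    set n := N.toNat with hn
    have hnlen : n ≤ ov.length := by omega
    have hNn : N = ((n : Nat) : Int) := by omega
    have hdom' : ∀ v ∈ ov, -2147483648 ≤ v ∧ v ≤ 2147483648 := by
      unfold Dom_melt_cheese at hdom
      simp only [Bool.and_eq_true, List.all_eq_true] at hdom
      intro v hv
      have := hdom.1 v hv
      simpa [pvDomInt] using this
    have hT1 := one_le_tB ov n
    have hT32 := tB_le_32 ov n hdom' hz
    rw [alt_eq_shifted ov N h0 hlen hz]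
    have hml := meltA_shifted ov n hnlen hz 64 0 (by omega) (by omega)
    rw [shifted_zero] at hml
    unfold melt_cheese
    rw [← hNn] at hml
    exact hml
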